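-- pv_equiv track=rewrite | github.com/davidmalcolm/gcc-refactoring-scripts | refactor_options.py | split_into_properties
-- ===== SOURCE A (Python) =====
-- def split_into_properties(line):
--     # Naive parser: split by whitespace
--     items = line.split()
--
--     # Now recombine parenthesized regions, to handle spaces within
--     # parentheses
--     # Reverse  so that we can use "pop" to pop from the front:
--     items = items[::-1]
--
--     result = []
--     while items:
--         item = items.pop()
--         if '(' in item and ')' not in item:
--             while items:
--                 nextitem = items.pop()
--                 item += ' ' + nextitem
--                 if ')' in item:
--                     break
--         result.append(item)
--
--     return result
-- ===== SOURCE B (Python) =====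
-- def split_into_properties(line):
--     # Single forward pass with a state variable instead of reverse/pop
--     # nested loops and repeated string concatenation.
--     result = []
--     buf = None  # None when not inside a parenthesized region, else its tokens
--     for token in line.split():
--         if buf is None:
--             if '(' in token and ')' not in token:
--                 buf = [token]
--             else:
--                 result.append(token)
--         else:
--             buf.append(token)
--             if ')' in token:
--                 result.append(' '.join(buf))
--                 buf = None
--     if buf is not None:
--         result.append(' '.join(buf))
--     return result
-- ===== Notes on version B (the rewrite author's own statement) =====
-- stated objective: simpler
-- what changed: Replaces the reverse-then-pop stack with nested while loops and repeated string concatenation by one flat forward loop over the split tokens with a buffer state variable, joining each parenthesized region once with a single-space join.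
import Mathlib
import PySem

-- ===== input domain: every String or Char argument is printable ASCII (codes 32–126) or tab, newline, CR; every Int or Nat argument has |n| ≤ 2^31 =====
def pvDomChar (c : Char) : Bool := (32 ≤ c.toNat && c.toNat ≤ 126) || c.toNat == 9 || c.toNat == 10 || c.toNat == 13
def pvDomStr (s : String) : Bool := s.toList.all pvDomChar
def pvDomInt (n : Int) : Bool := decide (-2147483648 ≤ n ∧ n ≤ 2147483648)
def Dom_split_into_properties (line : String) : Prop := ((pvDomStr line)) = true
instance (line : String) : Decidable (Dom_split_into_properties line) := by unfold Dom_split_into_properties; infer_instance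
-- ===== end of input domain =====

-- B replaces A's reverse/pop stack with nested while loops by one flat forward loop
-- holding a buffer of tokens (objective: simpler).

-- ===== PORT A =====
-- A reverses the token list and pops from the BACK; popping from the back of the
-- reversed list visits tokens in the original order, so the port recurses on the
-- tokens in order (exact).

-- inner `while items:` loop of A: keeps popping and appending until ')' appears
-- in the accumulated item; returns the accumulated item and the remaining tokens
def pvAInner (item : String) (items : List String) : String × List String :=
  match items with
  | [] => (item, [])
  | nextitem :: rest =>
      let item' := item ++ " " ++ nextitem
      if PySem.Str.isIn ")" item' then (item', rest) else pvAInner item' rest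

-- needed by pvALoop's termination proof (the port cites it in decreasing_by)
lemma pvAInner_snd_length (item : String) (items : List String) :
    (pvAInner item items).2.length ≤ items.length := by
  induction items generalizing item with
  | nil => simp [pvAInner]
  | cons t rest ih =>
      simp only [pvAInner]
      split
      · simp
      · exact le_trans (ih _) (by simp)

-- outer `while items:` loop of A
def pvALoop (items : List String) : List String :=
  match items with
  | [] => []
  | item :: rest =>
      if PySem.Str.isIn "(" item && !PySem.Str.isIn ")" item then
        (pvAInner item rest).1 :: pvALoop (pvAInner item rest).2
      else
        item :: pvALoop rest
termination_by items.length
decreasing_by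
  · have := pvAInner_snd_length item rest
    simp only [List.length_cons]
    omega
  · simp

def split_into_properties (line : String) : List String :=
  pvALoop (PySem.Str.split₀ line)

-- ===== PORT B =====
-- one step of B's flat forward loop; state = (result, buf)
def pvBStep (st : List String × Option (List String)) (token : String) :
    List String × Option (List String) :=
  match st with
  | (result, none) =>
      if PySem.Str.isIn "(" token && !PySem.Str.isIn ")" token then
        (result, some [token])
      else
        (result ++ [token], none)
  | (result, some buf) =>
      let buf' := buf ++ [token]
      if PySem.Str.isIn ")" token then
        (result ++ [PySem.Str.join " " buf'], none)
      else
        (result, some buf')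

def split_into_properties_alt (line : String) : List String :=
  let st := (PySem.Str.split₀ line).foldl pvBStep ([], none)
  match st.2 with
  | none => st.1
  | some buf => st.1 ++ [PySem.Str.join " " buf]

-- ===== PRECONDITION & SPEC =====
def Spec_split_into_properties (line : String) (out : List String) : Prop := out = split_into_properties_alt line
instance (line : String) (out : List String) : Decidable (Spec_split_into_properties line out) := by unfold Spec_split_into_properties; infer_instance

-- ===== CLAIM (what is proved, stated in full; the proofs are below) =====
def Claim_equal_split_into_properties : Prop := ∀ (line : String), Dom_split_into_properties line → Spec_split_into_properties line (split_into_properties line)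

-- ===== LEMMAS AND PROOFS =====

-- B's trailing `if buf is not None: result.append(' '.join(buf))`
def pvBFinish (st : List String × Option (List String)) : List String :=
  match st.2 with
  | none => st.1
  | some buf => st.1 ++ [PySem.Str.join " " buf]

lemma pvJoin_singleton (t : String) : PySem.Str.join " " [t] = t := by
  simp [PySem.Str.join]

lemma charsJoin_append (sep q : List Char) (ps : List (List Char)) (h : ps ≠ []) :
    PySem.Chars.join sep (ps ++ [q]) = PySem.Chars.join sep ps ++ sep ++ q := by
  induction ps with
  | nil => simp at h
  | cons p rest ih =>
      cases rest with
      | nil => simp [PySem.Chars.join_cons_cons, PySem.Chars.join_singleton]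
      | cons r rest' =>
          have ih' := ih (by simp)
          simp only [List.cons_append] at ih' ⊢
          rw [PySem.Chars.join_cons_cons, ih', PySem.Chars.join_cons_cons]
          simp [List.append_assoc]

lemma pvJoin_append_singleton (buf : List String) (t : String) (h : buf ≠ []) :
    PySem.Str.join " " (buf ++ [t]) = PySem.Str.join " " buf ++ " " ++ t := by
  apply String.toList_inj.mp
  simp only [PySem.Str.toList_join, String.toList_append, List.map_append, List.map_cons,
    List.map_nil]
  rw [charsJoin_append _ _ _ (by simpa using h)]

lemma pvIsIn_close_append (a t : String) :
    PySem.Str.isIn ")" (a ++ " " ++ t) = (PySem.Str.isIn ")" a || PySem.Str.isIn ")" t) := by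
  rw [Bool.eq_iff_iff]
  simp [String.toList_append, PySem.Chars.isIn_iff_infix, List.singleton_infix_iff]

-- merging state: B's fold from (result, some buf) matches A's inner loop
lemma pvMerge_eq (ts : List String) : ∀ (result : List String) (buf : List String),
    buf ≠ [] → PySem.Str.isIn ")" (PySem.Str.join " " buf) = false →
    pvBFinish (ts.foldl pvBStep (result, some buf)) =
      pvBFinish ((pvAInner (PySem.Str.join " " buf) ts).2.foldl pvBStep
        (result ++ [(pvAInner (PySem.Str.join " " buf) ts).1], none)) := by
  induction ts with
  | nil => intro result buf _ _; simp [pvAInner, pvBFinish]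
  | cons t ts ih =>
      intro result buf hne hnc
      have hJ : PySem.Str.join " " (buf ++ [t]) = PySem.Str.join " " buf ++ " " ++ t :=
        pvJoin_append_singleton buf t hne
      have hC : PySem.Str.isIn ")" (PySem.Str.join " " buf ++ " " ++ t)
          = PySem.Str.isIn ")" t := by
        rw [pvIsIn_close_append, hnc, Bool.false_or]
      simp only [List.foldl_cons, pvBStep, pvAInner, hC]
      by_cases h : PySem.Str.isIn ")" t = true
      · rw [if_pos h, if_pos h, hJ]
      · rw [if_neg h, if_neg h,
            ih _ (buf ++ [t]) (by simp)
              (by rw [hJ, pvIsIn_close_append, hnc]; simpa using h),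
            hJ]

-- main invariant: B's fold from (result, none) computes result ++ A's loop
lemma pvMain_aux (n : Nat) : ∀ (ts : List String), ts.length ≤ n → ∀ (result : List String),
    pvBFinish (ts.foldl pvBStep (result, none)) = result ++ pvALoop ts := by
  induction n with
  | zero =>
      intro ts hts result
      have : ts = [] := List.eq_nil_of_length_eq_zero (Nat.le_zero.mp hts)
      subst this; simp [pvALoop, pvBFinish]
  | succ n ih =>
      intro ts hts result
      cases ts with
      | nil => simp [pvALoop, pvBFinish]
      | cons t ts =>
          rw [pvALoop]
          simp only [List.foldl_cons, pvBStep]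
          by_cases h : (PySem.Str.isIn "(" t && !PySem.Str.isIn ")" t) = true
          · have hno : PySem.Str.isIn ")" t = false := by
              rcases Bool.and_eq_true .. |>.mp h with ⟨_, h2⟩
              simpa using h2
            rw [if_pos h, if_pos h]
            have hm := pvMerge_eq ts result [t] (by simp)
              (by rw [pvJoin_singleton]; exact hno)
            rw [pvJoin_singleton] at hm
            rw [hm, ih _ (le_trans (pvAInner_snd_length t ts) (Nat.lt_succ_iff.mp (by simpa using hts))) _]
            simp
          · rw [if_neg h, if_neg h, ih ts (Nat.lt_succ_iff.mp (by simpa using hts)) (result ++ [t])]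
            simp

lemma pvMain_eq (ts : List String) (result : List String) :
    pvBFinish (ts.foldl pvBStep (result, none)) = result ++ pvALoop ts :=
  pvMain_aux ts.length ts le_rfl result

-- ===== VERDICT (by name: the statement is the Claim_ definition above) =====
theorem split_into_properties_spec : Claim_equal_split_into_properties := by
  intro line _
  unfold Spec_split_into_properties split_into_properties split_into_properties_alt
  have h := pvMain_eq (PySem.Str.split₀ line) []
  simpa [pvBFinish] using h.symm
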